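-- pv_equiv track=rewrite | github.com/suhail-ibne-habib/Algoes | BFS.py | bfs_path_cost
-- ===== SOURCE A (Python) =====
-- from collections import deque
--
-- def bfs_path_cost(graph, start, end):
--
--     if start not in graph or end not in graph:
--         return None, None
--
--     queue = deque([ (start, [start], 0) ])
--     visited = {start}
--
--     while queue:
--         node, path, cost = queue.popleft()
--
--         if node == end:
--             return path, cost
--
--         for neighbor, edge_cost in graph.get( node, [] ):
--             if neighbor not in visited:
--                 visited.add(neighbor)
--                 queue.append( (neighbor, path + [neighbor], cost + edge_cost) )
--
--     return None, None
-- ===== SOURCE B (Python) =====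
-- def bfs_path_cost(graph, start, end):
--     # BFS over an array-backed queue (index pointer instead of popping), keeping one
--     # dict node -> (parent, cost); the path is reconstructed once, when end is reached.
--     if start not in graph or end not in graph:
--         return None, None
--
--     info = {start: (None, 0)}   # node -> (parent node or None, cost from start)
--     order = [start]             # discovery order; order[i:] is the pending queue
--     i = 0
--
--     while i < len(order):
--         node = order[i]
--         i += 1
--
--         if node == end:
--             path = []
--             while node is not None:
--                 path.append(node)
--                 node = info[node][0]
--             path.reverse()
--             return path, info[end][1]
--
--         for nb, w in graph.get(node, []):
--             if nb not in info:
--                 info[nb] = (node, info[node][1] + w)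
--                 order.append(nb)
--
--     return None, None
-- ===== Notes on version B (the rewrite author's own statement) =====
-- stated objective: alternative
-- what changed: Instead of a deque of (node, path-copy, cost) triples with a separate visited set, B runs BFS over an array-backed queue read by an index pointer, keeps a single dict node -> (parent, cost), and reconstructs the path once when the target is reached; this removes the O(path) list copy done on every push.
import Mathlib
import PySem

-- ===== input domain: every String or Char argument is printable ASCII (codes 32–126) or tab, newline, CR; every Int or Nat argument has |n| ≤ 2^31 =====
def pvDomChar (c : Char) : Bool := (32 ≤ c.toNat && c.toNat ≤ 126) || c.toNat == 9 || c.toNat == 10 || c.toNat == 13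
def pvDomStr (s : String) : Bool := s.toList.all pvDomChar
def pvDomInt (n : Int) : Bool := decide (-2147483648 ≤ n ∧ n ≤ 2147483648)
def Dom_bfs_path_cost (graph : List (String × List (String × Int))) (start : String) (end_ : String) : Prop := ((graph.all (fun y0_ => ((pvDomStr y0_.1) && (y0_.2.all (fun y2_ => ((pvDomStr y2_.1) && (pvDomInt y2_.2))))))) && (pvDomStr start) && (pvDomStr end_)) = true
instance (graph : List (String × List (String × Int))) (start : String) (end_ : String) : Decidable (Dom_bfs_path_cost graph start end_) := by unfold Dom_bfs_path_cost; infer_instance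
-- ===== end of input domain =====

-- B replaces A's deque of (node, path-copy, cost) entries by an array-backed queue
-- (index pointer) with one node -> (parent, cost) dict and a single final path
-- reconstruction (objective: alternative).


-- fuel for both loops: every pop / index step is enabled by an earlier push, and
-- pushes are at most 1 (start) + one per edge, so this exceeds the iteration count.
def pvFuel (graph : List (String × List (String × Int))) : Nat :=
  (graph.map (fun kv => kv.2.length)).sum + 2

-- ===== PORT A =====
-- A's while-loop; queue entries are (node, path, cost) exactly as in the Python.
def pvLoopA (g : PySem.Dict String (List (String × Int))) (end_ : String) :
    Nat → List (String × List String × Int) → PySem.Set String → Option (List String) × Option Int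
  | _, [], _ => (none, none)
  | 0, _ :: _, _ => (none, none)   -- fuel exhausted: unreachable for the fuel the port supplies
  | f + 1, (node, path, cost) :: rest, visited =>
    if node == end_ then (some path, some cost)
    else
      -- for neighbor, edge_cost in graph.get(node, []): …
      let st := (g.getD node []).foldl
        (fun (st : List (String × List String × Int) × PySem.Set String) nc =>
          if nc.1 ∈ st.2 then st
          else (st.1 ++ [(nc.1, path ++ [nc.1], cost + nc.2)], PySem.Set.add st.2 nc.1))
        (rest, visited)
      pvLoopA g end_ f st.1 st.2

def bfs_path_cost (graph : List (String × List (String × Int))) (start : String) (end_ : String) : Option (List String) × Option Int :=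
  if !((PySem.Dict.mk graph).contains start) || !((PySem.Dict.mk graph).contains end_) then (none, none)
  else pvLoopA (PySem.Dict.mk graph) end_ (pvFuel graph) [(start, [start], 0)] (PySem.Set.ofList [start])

-- ===== PORT B =====
-- 'while node is not None: path.append(node); node = info[node][0]' then reverse,
-- written as a cons-accumulating loop; fuel = info.size suffices because the parent
-- chain visits distinct keys of info.
def pvRebuild (info : PySem.Dict String (Option String × Int)) :
    Nat → String → List String → List String
  | 0, cur, path => cur :: path   -- fuel exhausted: unreachable
  | f + 1, cur, path =>
    match info.get? cur with
    | some (some p, _) => pvRebuild info f p (cur :: path)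
    | _ => cur :: path

-- 'for nb, w in graph.get(node, []): if nb not in info: …', structural recursion
-- over the adjacency list, growing (order, info).
def pvScan (node : String) : List (String × Int) →
    List String × PySem.Dict String (Option String × Int) →
    List String × PySem.Dict String (Option String × Int)
  | [], st => st
  | (nb, w) :: rest, (order, info) =>
    if info.contains nb then pvScan node rest (order, info)
    else pvScan node rest
      (order ++ [nb], info.insert nb (some node, (info.getD node (none, 0)).2 + w))

-- B's while-loop: 'while i < len(order)', order[i:] playing the queue.
def pvLoopB (g : PySem.Dict String (List (String × Int))) (end_ : String) :
    Nat → List String → Nat → PySem.Dict String (Option String × Int) →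
    Option (List String) × Option Int
  | 0, _, _, _ => (none, none)   -- fuel exhausted: unreachable
  | f + 1, order, i, info =>
    match order[i]? with
    | none => (none, none)
    | some node =>
      if node == end_ then
        (some (pvRebuild info info.size node []), (info.get? end_).map (·.2))  -- info[end]: key always present here
      else
        let st := pvScan node (g.getD node []) (order, info)
        pvLoopB g end_ f st.1 (i + 1) st.2

def bfs_path_cost_alt (graph : List (String × List (String × Int))) (start : String) (end_ : String) : Option (List String) × Option Int :=
  if !((PySem.Dict.mk graph).contains start) || !((PySem.Dict.mk graph).contains end_) then (none, none)
  else pvLoopB (PySem.Dict.mk graph) end_ (pvFuel graph) [start] 0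
        (PySem.Dict.empty.insert start (none, 0))

-- ===== PRECONDITION & SPEC =====
def Spec_bfs_path_cost (graph : List (String × List (String × Int))) (start : String) (end_ : String) (out : Option (List String) × Option Int) : Prop := out = bfs_path_cost_alt graph start end_
instance (graph : List (String × List (String × Int))) (start : String) (end_ : String) (out : Option (List String) × Option Int) : Decidable (Spec_bfs_path_cost graph start end_ out) := by unfold Spec_bfs_path_cost; infer_instance

-- ===== CLAIM (what is proved, stated in full; the proofs are below) =====
def Claim_equal_bfs_path_cost : Prop := ∀ (graph : List (String × List (String × Int))) (start : String) (end_ : String), Dom_bfs_path_cost graph start end_ → Spec_bfs_path_cost graph start end_ (bfs_path_cost graph start end_)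

-- ===== LEMMAS AND PROOFS =====

-- 'p is the parent chain of n in info': rebuilding from n yields p.
inductive PvChain (info : PySem.Dict String (Option String × Int)) : String → List String → Prop
  | base {n c} : info.get? n = some (none, c) → PvChain info n [n]
  | step {n m c p} : info.get? n = some (some m, c) → PvChain info m p → PvChain info n (p ++ [n])

theorem pvChain_mono {info info' : PySem.Dict String (Option String × Int)}
    (hmono : ∀ k v, info.get? k = some v → info'.get? k = some v)
    {n p} (h : PvChain info n p) : PvChain info' n p := by
  induction h with
  | base h0 => exact PvChain.base (hmono _ _ h0)
  | step h0 _ ih => exact PvChain.step (hmono _ _ h0) ih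

theorem pvChain_rebuild {info : PySem.Dict String (Option String × Int)} {n p}
    (h : PvChain info n p) : ∀ f, p.length ≤ f + 1 → ∀ acc, pvRebuild info f n acc = p ++ acc := by
  induction h with
  | base h0 =>
    intro f _ acc
    cases f with
    | zero => simp [pvRebuild]
    | succ f => simp [pvRebuild, h0]
  | @step n' m' c' p' h0 hc ih =>
    intro f hf acc
    cases f with
    | zero =>
      have hp : p' = [] := by simpa using hf
      subst hp; simp [pvRebuild]
    | succ f =>
      have hstep : pvRebuild info (f+1) n' acc = pvRebuild info f m' (n' :: acc) := by
        simp [pvRebuild, h0]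
      have hlen : p'.length ≤ f + 1 := by
        have := hf; simp at this; omega
      rw [hstep, ih f hlen (n' :: acc)]
      simp

theorem pvChain_subset {info : PySem.Dict String (Option String × Int)} {n p}
    (h : PvChain info n p) : ∀ x ∈ p, x ∈ info.keys := by
  induction h with
  | base h0 =>
    intro x hx; simp at hx; subst hx
    by_contra hmem
    rw [← PySem.Dict.get?_eq_none_iff_not_mem_keys] at hmem
    simp [hmem] at h0
  | step h0 _ ih =>
    intro x hx
    rcases List.mem_append.1 hx with hx | hx
    · exact ih x hx
    · simp at hx; subst hx
      by_contra hmem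
      rw [← PySem.Dict.get?_eq_none_iff_not_mem_keys] at hmem
      simp [hmem] at h0

theorem pvChain_unique {info : PySem.Dict String (Option String × Int)} {n p q}
    (h : PvChain info n p) (h' : PvChain info n q) : p = q := by
  induction h generalizing q with
  | base h0 =>
    cases h' with
    | base => rfl
    | step h1 => rw [h0] at h1; simp at h1
  | step h0 hc ih =>
    cases h' with
    | base h1 => rw [h0] at h1; simp at h1
    | step h1 hc' =>
      rw [h0] at h1
      simp only [Option.some.injEq, Prod.mk.injEq] at h1
      obtain ⟨h1, -⟩ := h1
      subst h1
      rw [ih hc']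

theorem pvChain_mem_sub {info : PySem.Dict String (Option String × Int)} {m p}
    (h : PvChain info m p) : ∀ x ∈ p, ∃ q s, p = q ++ s ∧ PvChain info x q := by
  induction h with
  | base h0 =>
    intro x hx; simp at hx; subst hx
    exact ⟨_, [], by simp, PvChain.base h0⟩
  | @step n' m' c' p' h0 hc ih =>
    intro x hx
    rcases List.mem_append.1 hx with hx | hx
    · rcases ih x hx with ⟨q, s, hps, hq⟩
      exact ⟨q, s ++ [n'], by simp [hps], hq⟩
    · simp at hx; subst hx
      exact ⟨_, [], by simp, PvChain.step h0 hc⟩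

theorem pvChain_nodup {info : PySem.Dict String (Option String × Int)} {n p}
    (h : PvChain info n p) : p.Nodup := by
  induction h with
  | base h0 => simp
  | step h0 hc ih =>
    rename_i n' m' c' p'
    have hnn : n' ∉ p' := by
      intro hmem
      rcases pvChain_mem_sub hc _ hmem with ⟨q, s, hps, hq⟩
      have he : q = p' ++ [n'] := pvChain_unique hq (PvChain.step h0 hc)
      have hl := congrArg List.length hps
      rw [he] at hl
      simp at hl
    have hdisj : List.Disjoint p' [n'] := by
      intro a ha hb; simp at hb; subst hb; exact hnn ha
    exact ih.append (List.nodup_singleton _) hdisj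

theorem pvChain_length_le {info : PySem.Dict String (Option String × Int)} {n p}
    (h : PvChain info n p) (_hnd : info.keys.Nodup) : p.length ≤ info.size := by
  have hsub := pvChain_subset h
  have hpn := pvChain_nodup h
  have : p.length ≤ info.keys.length := by
    classical
    calc p.length = p.toFinset.card := (List.toFinset_card_of_nodup hpn).symm
      _ ≤ info.keys.toFinset.card := Finset.card_le_card (fun x hx => by
            simp only [List.mem_toFinset] at *; exact hsub x hx)
      _ ≤ info.keys.length := List.toFinset_card_le _
  have hk : info.keys.length = info.size := by
    simp [PySem.Dict.keys, PySem.Dict.size]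
  omega

theorem pv_mem_keys_of_get? {ν : Type} (d : PySem.Dict String ν) (k : String) (v : ν)
    (h : d.get? k = some v) : k ∈ d.keys := by
  by_contra hmem
  rw [← PySem.Dict.get?_eq_none_iff_not_mem_keys] at hmem
  rw [hmem] at h; cases h

-- joint invariant of A's queue/visited and B's order/index/info
def PvInv (qA : List (String × List String × Int)) (vis : PySem.Set String)
    (order : List String) (i : Nat) (info : PySem.Dict String (Option String × Int)) : Prop :=
  order.drop i = qA.map (·.1) ∧
  i ≤ order.length ∧
  (vis : List String) = info.keys ∧
  info.keys.Nodup ∧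
  (∀ e ∈ qA, PvChain info e.1 e.2.1 ∧ ∃ po, info.get? e.1 = some (po, e.2.2))

theorem pv_scan_inv (node : String) (path : List String) (cost : Int)
    (l : List (String × Int)) :
    ∀ (rA : List (String × List String × Int)) (vis : PySem.Set String)
      (order : List String) (i : Nat) (info : PySem.Dict String (Option String × Int)),
      PvInv rA vis order i info →
      PvChain info node path → (∃ po, info.get? node = some (po, cost)) →
      (let a := l.foldl
          (fun (st : List (String × List String × Int) × PySem.Set String) nc =>
            if nc.1 ∈ st.2 then st
            else (st.1 ++ [(nc.1, path ++ [nc.1], cost + nc.2)], PySem.Set.add st.2 nc.1))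
          (rA, vis);
       let b := pvScan node l (order, info);
       PvInv a.1 a.2 b.1 i b.2) := by
  induction l with
  | nil => intro rA vis order i info hinv _ _; exact hinv
  | cons x l ih =>
    intro rA vis order i info hinv hchain hcost
    obtain ⟨hq, hi, hv, hnd, hent⟩ := hinv
    obtain ⟨x1, x2⟩ := x
    simp only [List.foldl_cons, pvScan]
    by_cases hmem : x1 ∈ (vis : List String)
    · have hBc : info.contains x1 = true := by
        rw [PySem.Dict.contains_iff_mem_keys]; rw [hv] at hmem; exact hmem
      rw [if_pos hmem, if_pos hBc]
      exact ih rA vis order i info ⟨hq, hi, hv, hnd, hent⟩ hchain hcost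
    · have hBc : info.contains x1 = false := by
        rw [Bool.eq_false_iff]
        intro hc; rw [PySem.Dict.contains_iff_mem_keys] at hc; rw [hv] at hmem; exact hmem hc
      rw [if_neg hmem, if_neg (by simp [hBc])]
      have hxkeys : x1 ∉ info.keys := by rw [← hv]; exact hmem
      have hmono : ∀ k v, info.get? k = some v →
          (info.insert x1 (some node, (info.getD node (none, 0)).2 + x2)).get? k = some v := by
        intro k v hkv
        have hk : k ≠ x1 := by
          intro he; subst he; exact hxkeys (pv_mem_keys_of_get? _ _ _ hkv)
        rw [PySem.Dict.get?_insert_of_ne _ _ hk]; exact hkv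
      obtain ⟨po, hpo⟩ := hcost
      have hgd : (info.getD node (none, 0)).2 = cost := by
        rw [PySem.Dict.getD_of_get?_eq_some _ _ hpo]
      have hchain' := pvChain_mono hmono hchain
      apply ih _ _ _ _ _ _ hchain' ⟨po, hmono _ _ hpo⟩
      refine ⟨?_, by simp; omega, ?_, ?_, ?_⟩
      · rw [List.drop_append_of_le_length hi, hq]; simp
      · rw [PySem.Set.add_of_not_mem hmem,
            PySem.Dict.keys_insert_of_not_contains _ _ hBc, hv]
      · rw [PySem.Dict.keys_insert_of_not_contains _ _ hBc]
        have hdisj : List.Disjoint info.keys [x1] := by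
          intro a ha hb; simp at hb; subst hb; exact hxkeys ha
        exact hnd.append (List.nodup_singleton _) hdisj
      · intro e he
        rcases List.mem_append.1 he with he | he
        · obtain ⟨hec, po', hpo'⟩ := hent e he
          exact ⟨pvChain_mono hmono hec, po', hmono _ _ hpo'⟩
        · simp at he; subst he
          refine ⟨PvChain.step (c := cost + x2) ?_ hchain', some node, ?_⟩
          · rw [PySem.Dict.get?_insert_self, hgd]
          · rw [PySem.Dict.get?_insert_self, hgd]

theorem pv_loop_eq (g : PySem.Dict String (List (String × Int))) (end_ : String) :
    ∀ (f : Nat) (qA : List (String × List String × Int)) (vis : PySem.Set String)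
      (order : List String) (i : Nat) (info : PySem.Dict String (Option String × Int)),
      PvInv qA vis order i info →
      pvLoopA g end_ f qA vis = pvLoopB g end_ f order i info := by
  intro f
  induction f with
  | zero =>
    intro qA vis order i info _
    cases qA with
    | nil => rfl
    | cons e rest => cases e; rfl
  | succ f ih =>
    intro qA vis order i info hinv
    obtain ⟨hq, hi, hv, hnd, hent⟩ := hinv
    cases qA with
    | nil =>
      have hnone : order[i]? = none := by
        simp only [List.map_nil] at hq
        exact List.getElem?_eq_none (List.drop_eq_nil_iff.mp hq)
      simp only [pvLoopA, pvLoopB, hnone]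
    | cons e rest =>
      obtain ⟨node, path, cost⟩ := e
      have hsome : order[i]? = some node := by
        have h0 : (order.drop i)[0]? = some node := by rw [hq]; rfl
        rw [List.getElem?_drop] at h0
        simpa using h0
      have hilt : i < order.length := by
        by_contra h
        rw [List.getElem?_eq_none (by omega)] at hsome
        cases hsome
      obtain ⟨hchain, po, hpo⟩ := hent _ (List.mem_cons_self ..)
      simp only [pvLoopA, pvLoopB, hsome]
      by_cases hend : node == end_
      · have heq : node = end_ := by simpa using hend
        simp only [hend, if_true]
        have h1 : pvRebuild info info.size node [] = path := by
          have := pvChain_rebuild hchain info.size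
            (Nat.le_succ_of_le (pvChain_length_le hchain hnd)) []
          simpa using this
        rw [h1, ← heq, hpo]; rfl
      · simp only [hend]
        have hdrop : (order.drop (i + 1)) = rest.map (·.1) := by
          have : order.drop (i + 1) = (order.drop i).drop 1 := by
            rw [List.drop_drop]
          rw [this, hq]; rfl
        have hrest : ∀ e ∈ rest, PvChain info e.1 e.2.1 ∧ ∃ po, info.get? e.1 = some (po, e.2.2) :=
          fun e he => hent e (List.mem_cons_of_mem _ he)
        have hfold := pv_scan_inv node path cost (g.getD node []) rest vis order (i + 1)
          info ⟨hdrop, hilt, hv, hnd, hrest⟩ hchain ⟨po, hpo⟩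
        exact ih _ _ _ _ _ hfold

-- ===== VERDICT (by name: the statement is the Claim_ definition above) =====
theorem bfs_path_cost_spec : Claim_equal_bfs_path_cost := by
  intro graph start end_ _
  show bfs_path_cost graph start end_ = bfs_path_cost_alt graph start end_
  unfold bfs_path_cost bfs_path_cost_alt
  by_cases hg : (!((PySem.Dict.mk graph).contains start) || !((PySem.Dict.mk graph).contains end_)) = true
  · rw [if_pos hg, if_pos hg]
  · rw [if_neg hg, if_neg hg]
    apply pv_loop_eq
    have hsc : (PySem.Dict.empty.insert start ((none : Option String), (0 : Int))).get? start
        = some (none, 0) := PySem.Dict.get?_insert_self _ _ _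
    have hkeys : (PySem.Dict.empty.insert start ((none : Option String), (0 : Int))).keys = [start] := by
      rw [PySem.Dict.keys_insert_of_not_contains _ _ (PySem.Dict.contains_empty _)]
      simp [PySem.Dict.keys_empty]
    refine ⟨by simp, by simp, ?_, ?_, ?_⟩
    · rw [hkeys]
      exact PySem.Set.ofList_eq_self_of_nodup _ (List.nodup_singleton _)
    · rw [hkeys]; simp
    · intro e he
      simp at he; subst he
      exact ⟨PvChain.base hsc, none, hsc⟩
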